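-- pv_equiv track=rewrite | github.com/austinoxyz/reddit-thread-video-generator | test/write-comment-bodys.py | insert_spaces_after_sentences
-- ===== SOURCE A (Python) =====
-- def insert_spaces_after_sentences(paragraph):
--     result = ''
--     for i in range(len(paragraph)):
--         char = paragraph[i]
--         result += char
--         if char == '.' and (i + 1 >= len(paragraph) or paragraph[i + 1] != ' '):
--             result += ' '
--     return result
-- ===== SOURCE B (Python) =====
-- def insert_spaces_after_sentences(paragraph):
--     # Insert one space after every '.' not already followed by a space:
--     # first give every '.' one extra space, then collapse the doubled space
--     # after dots that already had one.
--     return paragraph.replace('.', '. ').replace('.  ', '. ')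
-- ===== Notes on version B (the rewrite author's own statement) =====
-- stated objective: faster
-- what changed: Replaced the per-character index loop with two whole-string str.replace passes: the first inserts a space after every period, the second collapses the doubled space after periods that already had one.
import Mathlib
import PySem

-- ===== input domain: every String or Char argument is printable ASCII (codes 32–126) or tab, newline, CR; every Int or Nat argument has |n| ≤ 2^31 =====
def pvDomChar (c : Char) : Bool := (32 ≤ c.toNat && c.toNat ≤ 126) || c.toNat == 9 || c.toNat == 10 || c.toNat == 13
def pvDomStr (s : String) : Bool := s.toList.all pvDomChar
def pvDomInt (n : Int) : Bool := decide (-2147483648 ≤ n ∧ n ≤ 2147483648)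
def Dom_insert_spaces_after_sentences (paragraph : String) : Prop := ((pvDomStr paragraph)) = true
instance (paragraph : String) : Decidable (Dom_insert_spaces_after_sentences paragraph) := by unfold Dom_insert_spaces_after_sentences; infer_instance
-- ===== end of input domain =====

-- B replaces A's per-character index loop with two whole-string replace passes
-- (insert a space after every period, then collapse the doubled space after periods
-- that already had one); measured faster (constant factor) in Python.


-- ===== PORT A =====
-- literal transliteration of A: result = ''; for i in range(len(paragraph)): append
-- paragraph[i], then a space when it is '.' and the next char is absent or not ' '.
def insert_spaces_after_sentences (paragraph : String) : String :=
  let cs := paragraph.toList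
  String.ofList ((PySem.List.pyRange 0 (PySem.List.len cs) 1).foldl
    (fun result i =>
      let char := PySem.List.pyGetD cs i ' '
      let result := result ++ [char]
      if char = '.' ∧ (i + 1 ≥ PySem.List.len cs ∨ PySem.List.pyGetD cs (i + 1) ' ' ≠ ' ')
      then result ++ [' ']
      else result)
    [])

-- ===== PORT B =====
-- literal transliteration of Source B: two str.replace passes via PySem.Str.replace
def insert_spaces_after_sentences_alt (paragraph : String) : String :=
  PySem.Str.replace (PySem.Str.replace paragraph "." ". ") ".  " ". "

-- ===== PRECONDITION & SPEC =====
def Spec_insert_spaces_after_sentences (paragraph : String) (out : String) : Prop := out = insert_spaces_after_sentences_alt paragraph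
instance (paragraph : String) (out : String) : Decidable (Spec_insert_spaces_after_sentences paragraph out) := by unfold Spec_insert_spaces_after_sentences; infer_instance

-- ===== CLAIM (what is proved, stated in full; the proofs are below) =====
def Claim_equal_insert_spaces_after_sentences : Prop := ∀ (paragraph : String), Dom_insert_spaces_after_sentences paragraph → Spec_insert_spaces_after_sentences paragraph (insert_spaces_after_sentences paragraph)

-- ===== LEMMAS AND PROOFS =====

-- the common reference function: insert a space after each '.' whose successor is absent or not ' '
def insSpec : List Char → List Char
  | [] => []
  | c :: cs =>
      if c = '.' ∧ (cs = [] ∨ cs.getD 0 ' ' ≠ ' ') then c :: ' ' :: insSpec cs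
      else c :: insSpec cs

-- structural form of PySem.Chars.replace with a nonempty pattern c0 :: old'
def repRec (c0 : Char) (old' new : List Char) : List Char → List Char
  | [] => []
  | c :: t =>
      if (c0 :: old').isPrefixOf (c :: t) then new ++ repRec c0 old' new (t.drop old'.length)
      else c :: repRec c0 old' new t
termination_by l => l.length
decreasing_by all_goals (simp only [List.length_drop, List.length_cons]; omega)

theorem replace_go_spec (c0 : Char) (old' new : List Char) :
    ∀ (fuel : Nat) (l acc : List Char), l.length ≤ fuel →
      PySem.Chars.replace.go (c0 :: old') new fuel l acc = acc.reverse ++ repRec c0 old' new l := by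
  intro fuel
  induction fuel with
  | zero =>
      intro l acc h
      have : l = [] := List.eq_nil_of_length_eq_zero (Nat.le_zero.mp h)
      subst this
      simp [PySem.Chars.replace.go, repRec]
  | succ n ih =>
      intro l acc h
      cases l with
      | nil => simp [PySem.Chars.replace.go, repRec]
      | cons c t =>
          simp only [PySem.Chars.replace.go]
          simp only [List.length_cons] at h
          by_cases hp : (c0 :: old').isPrefixOf (c :: t) = true
          · rw [if_pos hp, ih _ _ (by simp only [List.length_drop, List.length_cons]; omega)]
            simp [repRec, hp]
          · rw [if_neg hp, ih _ _ (by omega)]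
            simp [repRec, hp]

theorem replace_eq_repRec (l : List Char) (c0 : Char) (old' new : List Char) :
    PySem.Chars.replace l (c0 :: old') new = repRec c0 old' new l := by
  simp [PySem.Chars.replace]
  exact replace_go_spec c0 old' new l.length l [] (le_refl _)

-- the per-index piece A appends for index k (Nat form of A's loop body contribution)
def gN (cs : List Char) (k : Nat) : List Char :=
  if cs.getD k ' ' = '.' ∧ (cs.length ≤ k + 1 ∨ cs.getD (k + 1) ' ' ≠ ' ')
  then [cs.getD k ' ', ' ']
  else [cs.getD k ' ']

theorem gN_cons_succ (c : Char) (t : List Char) (k : Nat) : gN (c :: t) (k + 1) = gN t k := by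
  simp [gN]

theorem flatMap_gN (cs : List Char) :
    (List.range cs.length).flatMap (gN cs) = insSpec cs := by
  induction cs with
  | nil => simp [insSpec]
  | cons c t ih =>
      rw [List.length_cons, List.range_succ_eq_map, List.flatMap_cons, List.flatMap_map]
      have h1 : ∀ k, gN (c :: t) (Nat.succ k) = gN t k := fun k => gN_cons_succ c t k
      simp only [h1, ih]
      have h0 : gN (c :: t) 0 =
          if c = '.' ∧ (t = [] ∨ t.getD 0 ' ' ≠ ' ') then [c, ' '] else [c] := by
        simp only [gN, List.getD_cons_zero, List.length_cons, List.getD_cons_succ]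
        have : t.length + 1 ≤ 0 + 1 ↔ t = [] := by
          rw [Nat.add_le_add_iff_right, Nat.le_zero, List.length_eq_zero_iff]
        simp only [this]
      rw [h0, insSpec]
      split <;> simp

-- A's foldl over range(len) equals the reference recursion insSpec
theorem a_eq_insSpec (cs : List Char) :
    (PySem.List.pyRange 0 (PySem.List.len cs) 1).foldl
      (fun result i =>
        let char := PySem.List.pyGetD cs i ' '
        let result := result ++ [char]
        if char = '.' ∧ (i + 1 ≥ PySem.List.len cs ∨ PySem.List.pyGetD cs (i + 1) ' ' ≠ ' ')
        then result ++ [' ']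
        else result)
      [] = insSpec cs := by
  have hstep : (fun (result : List Char) (i : Int) =>
        let char := PySem.List.pyGetD cs i ' '
        let result := result ++ [char]
        if char = '.' ∧ (i + 1 ≥ PySem.List.len cs ∨ PySem.List.pyGetD cs (i + 1) ' ' ≠ ' ')
        then result ++ [' ']
        else result) =
      fun result i => result ++
        (if PySem.List.pyGetD cs i ' ' = '.' ∧
            (i + 1 ≥ PySem.List.len cs ∨ PySem.List.pyGetD cs (i + 1) ' ' ≠ ' ')
         then [PySem.List.pyGetD cs i ' ', ' ']
         else [PySem.List.pyGetD cs i ' ']) := by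
    funext r i
    dsimp only
    split
    · simp
    · rfl
  rw [hstep, PySem.List.foldl_append_eq_flatMap, List.nil_append, PySem.List.len_eq,
    PySem.List.pyRange_zero_natCast, List.flatMap_map]
  have hg : ∀ k : Nat, (if PySem.List.pyGetD cs (k : Int) ' ' = '.' ∧
        ((k : Int) + 1 ≥ (cs.length : Int) ∨ PySem.List.pyGetD cs ((k : Int) + 1) ' ' ≠ ' ')
      then [PySem.List.pyGetD cs (k : Int) ' ', ' ']
      else [PySem.List.pyGetD cs (k : Int) ' ']) = gN cs k := by
    intro k
    have hcast : ((k : Int) + 1) = ((k + 1 : Nat) : Int) := by push_cast; ring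
    have hcond : (((k + 1 : Nat) : Int) ≥ (cs.length : Int)) ↔ cs.length ≤ k + 1 := by omega
    rw [hcast, PySem.List.pyGetD_natCast, PySem.List.pyGetD_natCast, gN]
    simp only [hcond]
  simp only [hg]
  exact flatMap_gN cs

-- B's two replace passes equal the reference recursion insSpec
theorem r1_cons (c : Char) (t : List Char) :
    repRec '.' [] ['.', ' '] (c :: t) =
      if c = '.' then '.' :: ' ' :: repRec '.' [] ['.', ' '] t
      else c :: repRec '.' [] ['.', ' '] t := by
  rw [repRec]
  have hp : (['.'].isPrefixOf (c :: t)) = ('.' == c) := by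
    show ('.' == c && [].isPrefixOf t) = ('.' == c); simp
  by_cases h : c = '.'
  · subst h; rw [hp]; simp
  · rw [hp, if_neg (by simp; exact fun hh => h hh.symm), if_neg h]

theorem r2_cons_ne (c : Char) (X : List Char) (h : c ≠ '.') :
    repRec '.' [' ', ' '] ['.', ' '] (c :: X) = c :: repRec '.' [' ', ' '] ['.', ' '] X := by
  rw [repRec]
  have hp : ((['.', ' ', ' ']).isPrefixOf (c :: X)) = false := by
    show ('.' == c && [' ', ' '].isPrefixOf X) = false
    simp; exact fun hh => absurd hh.symm h
  rw [hp]; simp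

theorem r2_dot (X : List Char) :
    repRec '.' [' ', ' '] ['.', ' '] ('.' :: X) =
      if [' ', ' '].isPrefixOf X then '.' :: ' ' :: repRec '.' [' ', ' '] ['.', ' '] (X.drop 2)
      else '.' :: repRec '.' [' ', ' '] ['.', ' '] X := by
  rw [repRec]
  have hp : ((['.', ' ', ' ']).isPrefixOf ('.' :: X)) = ([' ', ' '].isPrefixOf X) := by
    show ('.' == '.' && [' ', ' '].isPrefixOf X) = _; simp
  rw [hp]
  by_cases h : [' ', ' '].isPrefixOf X <;> simp [h]

theorem r2_r1_eq_insSpec (cs : List Char) :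
    repRec '.' [' ', ' '] ['.', ' '] (repRec '.' [] ['.', ' '] cs) = insSpec cs := by
  induction cs with
  | nil => simp [repRec, insSpec]
  | cons c t ih =>
      rw [r1_cons]
      by_cases hc : c = '.'
      · subst hc
        rw [if_pos rfl, r2_dot]
        cases t with
        | nil => simp [repRec, insSpec]
        | cons d t' =>
            by_cases hd : d = ' '
            · subst hd
              rw [r1_cons] at ih ⊢
              rw [if_neg (show ¬((' ':Char) = '.') by decide)] at ih ⊢
              rw [r2_cons_ne _ _ (by decide),
                show insSpec (' ' :: t') = ' ' :: insSpec t' from by simp [insSpec]] at ih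
              have ih' : repRec '.' [' ', ' '] ['.', ' '] (repRec '.' [] ['.', ' '] t') = insSpec t' :=
                (List.cons.inj ih).2
              have hpre : ([' ', ' '].isPrefixOf
                  (' ' :: ' ' :: repRec '.' [] ['.', ' '] t')) = true := by
                show (' ' == ' ' && (' ' == ' ' && [].isPrefixOf (repRec '.' [] ['.', ' '] t'))) = true
                simp
              rw [hpre, if_pos rfl]
              simp only [List.drop_succ_cons, List.drop_zero, ih']
              simp [insSpec]
            · have hhead : ∃ x X, repRec '.' [] ['.', ' '] (d :: t') = x :: X ∧ (' ' == x) = false := by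
                rw [r1_cons]
                by_cases hdd : d = '.'
                · exact ⟨'.', _, by rw [if_pos hdd], by decide⟩
                · exact ⟨d, _, by rw [if_neg hdd], by simp; exact fun hh => hd hh.symm⟩
              obtain ⟨x, X, hX, hx⟩ := hhead
              have hpre : ([' ', ' '].isPrefixOf (' ' :: x :: X)) = false := by
                show (' ' == ' ' && (' ' == x && [].isPrefixOf X)) = false
                simp [hx]
              rw [hX, hpre, if_neg (by simp), r2_cons_ne _ _ (by decide), ← hX, ih]
              simp [insSpec, hd]
      · rw [if_neg hc, r2_cons_ne _ _ hc, ih]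
        simp [insSpec, hc]

-- ===== VERDICT (by name: the statement is the Claim_ definition above) =====
theorem insert_spaces_after_sentences_spec : Claim_equal_insert_spaces_after_sentences := by
  intro p _
  unfold Spec_insert_spaces_after_sentences insert_spaces_after_sentences
    insert_spaces_after_sentences_alt
  apply String.ext
  rw [String.toList_ofList, PySem.Str.toList_replace, PySem.Str.toList_replace]
  rw [show (".".toList) = ['.'] from rfl, show (". ".toList) = ['.', ' '] from rfl,
    show (".  ".toList) = ['.', ' ', ' '] from rfl]
  rw [replace_eq_repRec, replace_eq_repRec, r2_r1_eq_insSpec]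
  exact a_eq_insSpec p.toList
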